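-- pv_equiv track=rewrite | github.com/Unbiscuit/data_depersonalization | main.py | find_not_secure_rows
-- ===== SOURCE A (Python) =====
-- def find_not_secure_rows(k, occurrences, rows):
--
--     not_secure_rows = []
--     temp = rows.copy()
--
--     for i, occurrence in enumerate(occurrences.copy()):
--         if occurrence < k:
--             not_secure_rows.append(temp[i])
--             occurrences.remove(occurrence)
--             rows.remove(temp[i])
--
--     return not_secure_rows, occurrences, rows
-- ===== SOURCE B (Python) =====
-- def find_not_secure_rows(k, occurrences, rows):
--     # single pass per list: collect insecure rows by index, filter occurrences,
--     # remove rows via a per-value removal counter (preserves first-match order)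
--     bad = [rows[i] for i, o in enumerate(occurrences) if o < k]
--     new_occ = [o for o in occurrences if o >= k]
--     cnt = {}
--     for v in bad:
--         cnt[v] = cnt.get(v, 0) + 1
--     new_rows = []
--     for r in rows:
--         c = cnt.get(r, 0)
--         if c > 0:
--             cnt[r] = c - 1
--         else:
--             new_rows.append(r)
--     occurrences[:] = new_occ
--     rows[:] = new_rows
--     return bad, new_occ, new_rows
-- ===== Notes on version B (the rewrite author's own statement) =====
-- stated objective: faster
-- what changed: A repeatedly calls list.remove (a linear scan) inside its loop over occurrences; B makes one indexed pass to collect the insecure rows, filters occurrences with a comprehension, and rebuilds rows in a single pass driven by a per-value removal counter dictionary.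
import Mathlib
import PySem

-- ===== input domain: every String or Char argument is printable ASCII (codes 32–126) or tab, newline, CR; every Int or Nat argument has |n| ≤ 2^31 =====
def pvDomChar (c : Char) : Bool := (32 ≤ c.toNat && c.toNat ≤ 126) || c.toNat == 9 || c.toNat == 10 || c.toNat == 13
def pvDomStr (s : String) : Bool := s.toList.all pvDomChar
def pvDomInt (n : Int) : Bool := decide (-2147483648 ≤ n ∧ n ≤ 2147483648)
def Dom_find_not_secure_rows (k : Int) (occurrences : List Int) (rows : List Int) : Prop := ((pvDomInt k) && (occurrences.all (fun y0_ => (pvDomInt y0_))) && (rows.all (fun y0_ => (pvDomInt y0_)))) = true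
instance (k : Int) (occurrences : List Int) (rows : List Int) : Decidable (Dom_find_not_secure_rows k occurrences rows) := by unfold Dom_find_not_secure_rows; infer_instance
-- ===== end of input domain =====

-- B replaces A's quadratic remove-in-a-loop by one indexed pass plus a per-value removal counter (faster).
-- A mutates its list arguments in place; B performs the same in-place mutation, and the equivalence proved here is about the return value.

-- ===== PORT A =====
-- the body of A's for-loop: on occurrence < k, append temp[i], occurrences.remove(occurrence), rows.remove(temp[i]);
-- temp[i] out of range is Python's IndexError (pyGet? = none; excluded by Pre_, the state is returned unchanged there)
def pvStepA (k : Int) (temp : List Int) (st : List Int × List Int × List Int) (p : Int × Int) :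
    List Int × List Int × List Int :=
  if p.2 < k then
    match PySem.List.pyGet? temp p.1 with
    | some v => (st.1 ++ [v], (PySem.List.remove? st.2.1 p.2).getD st.2.1,
                 (PySem.List.remove? st.2.2 v).getD st.2.2)
    | none => st
  else st

def find_not_secure_rows (k : Int) (occurrences : List Int) (rows : List Int) :
    List Int × List Int × List Int :=
  -- temp = rows.copy(); loop over enumerate(occurrences.copy())
  (PySem.List.enumerate occurrences).foldl (pvStepA k rows) ([], occurrences, rows)

-- ===== PORT B =====
-- bad = [rows[i] for i, o in enumerate(occurrences) if o < k]  (rows[i] out of range raises, excluded by Pre_)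
def pvBadStep (k : Int) (rows : List Int) (acc : List Int) (p : Int × Int) : List Int :=
  if p.2 < k then acc ++ [(PySem.List.pyGet? rows p.1).getD 0] else acc

-- cnt[v] = cnt.get(v, 0) + 1
def pvCntStep (d : PySem.Dict Int Int) (v : Int) : PySem.Dict Int Int :=
  d.insert v (d.getD v 0 + 1)

-- c = cnt.get(r, 0); if c > 0: cnt[r] = c - 1 else: new_rows.append(r)
def pvRowStep (st : List Int × PySem.Dict Int Int) (r : Int) : List Int × PySem.Dict Int Int :=
  let c := st.2.getD r 0
  if 0 < c then (st.1, st.2.insert r (c - 1)) else (st.1 ++ [r], st.2)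

def find_not_secure_rows_alt (k : Int) (occurrences : List Int) (rows : List Int) :
    List Int × List Int × List Int :=
  let bad := (PySem.List.enumerate occurrences).foldl (pvBadStep k rows) []
  let newOcc := occurrences.filter (fun o => decide (k ≤ o))
  let cnt := bad.foldl pvCntStep PySem.Dict.empty
  let newRows := (rows.foldl pvRowStep ([], cnt)).1
  (bad, newOcc, newRows)

-- ===== PRECONDITION & SPEC =====
-- Pre_ excludes exactly the inputs where both Pythons raise IndexError: an index i with
-- occurrences[i] < k but i out of range of rows (A's temp[i], B's rows[i]).
def Pre_find_not_secure_rows (k : Int) (occurrences : List Int) (rows : List Int) : Prop :=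
  ∀ p ∈ PySem.List.enumerate occurrences, p.2 < k → p.1 < (rows.length : Int)
instance (k : Int) (occurrences : List Int) (rows : List Int) :
    Decidable (Pre_find_not_secure_rows k occurrences rows) := by
  unfold Pre_find_not_secure_rows; infer_instance

def pvWitness_find_not_secure_rows : Int × List Int × List Int := (2, [1, 3], [10, 20])

def Spec_find_not_secure_rows (k : Int) (occurrences : List Int) (rows : List Int)
    (out : List Int × List Int × List Int) : Prop := out = find_not_secure_rows_alt k occurrences rows
instance (k : Int) (occurrences : List Int) (rows : List Int) (out : List Int × List Int × List Int) :
    Decidable (Spec_find_not_secure_rows k occurrences rows out) := by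
  unfold Spec_find_not_secure_rows; infer_instance

-- ===== CLAIM (what is proved, stated in full; the proofs are below) =====
def Claim_equal_find_not_secure_rows : Prop := ∀ (k : Int) (occurrences : List Int) (rows : List Int), Dom_find_not_secure_rows k occurrences rows → Pre_find_not_secure_rows k occurrences rows → Spec_find_not_secure_rows k occurrences rows (find_not_secure_rows k occurrences rows)

-- ===== LEMMAS AND PROOFS =====

-- remove-first as a total function; equals List.erase
def pvRmF (s : List Int) (v : Int) : List Int := (PySem.List.remove? s v).getD s

theorem pvRmF_eq_erase (s : List Int) (v : Int) : pvRmF s v = s.erase v := by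
  by_cases h : v ∈ s
  · simp [pvRmF, PySem.List.remove?_eq_some_erase _ _ h]
  · have h1 : PySem.List.remove? s v = none := (PySem.List.remove?_eq_none_iff s v).mpr h
    simp [pvRmF, h1, List.erase_of_not_mem h]

-- single pass over rows with a pending multiset of values still to remove
def pvScanP : List Int → List Int → List Int
  | _, [] => []
  | pending, r :: rs =>
    if r ∈ pending then pvScanP (pending.erase r) rs else r :: pvScanP pending rs

theorem pvScanP_nil : ∀ rows : List Int, pvScanP [] rows = rows := by
  intro rows; induction rows with
  | nil => rfl
  | cons r rs ih => simp [pvScanP, ih]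

theorem pvScanP_cons : ∀ (rows vs : List Int) (v : Int),
    pvScanP (v :: vs) rows = pvScanP vs (rows.erase v) := by
  intro rows
  induction rows with
  | nil => intro vs v; rfl
  | cons r rs ih =>
    intro vs v
    by_cases hrv : r = v
    · subst hrv
      simp [pvScanP, List.erase_cons_head]
    · have herase : (r :: rs).erase v = r :: rs.erase v := by
        simp [hrv]
      by_cases hm : r ∈ vs
      · have : r ∈ v :: vs := List.mem_cons_of_mem _ hm
        have hev : (v :: vs).erase r = v :: vs.erase r := by
          simp [(by simpa [eq_comm] using hrv : ¬ v = r)]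
        simp [pvScanP, this, hev, herase, hm, ih]
      · have hnm : r ∉ v :: vs := by
          intro hc; rcases List.mem_cons.mp hc with h | h
          · exact hrv h
          · exact hm h
        simp [pvScanP, hnm, hm, herase, ih]

theorem pvFoldErase_eq_scanP : ∀ (vs rows : List Int),
    vs.foldl (fun s v => s.erase v) rows = pvScanP vs rows := by
  intro vs
  induction vs with
  | nil => intro rows; simp [pvScanP_nil]
  | cons v vs ih => intro rows; simp only [List.foldl_cons]; rw [ih, ← pvScanP_cons]

-- guarded remove-fold = fold of erase over the collected values
theorem pvFoldGuardRemove {α : Type} (P : α → Prop) [DecidablePred P] (h : α → Int) :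
    ∀ (l : List α) (s0 : List Int),
      l.foldl (fun s x => if P x then pvRmF s (h x) else s) s0 =
      ((l.filter (fun x => decide (P x))).map h).foldl pvRmF s0 := by
  intro l
  induction l with
  | nil => intro s0; rfl
  | cons x xs ih =>
    intro s0
    by_cases hx : P x
    · have h1 : (x :: xs).filter (fun x => decide (P x)) =
          x :: xs.filter (fun x => decide (P x)) := by simp [hx]
      rw [List.foldl_cons, if_pos hx, h1, List.map_cons, List.foldl_cons, ih]
    · have h1 : (x :: xs).filter (fun x => decide (P x)) =
          xs.filter (fun x => decide (P x)) := by simp [hx]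
      rw [List.foldl_cons, if_neg hx, h1, ih]

theorem pvFoldRmF_eq_foldErase : ∀ (vs s : List Int),
    vs.foldl pvRmF s = vs.foldl (fun s v => s.erase v) s := by
  intro vs
  induction vs with
  | nil => intro s; rfl
  | cons v vs ih =>
    intro s
    simp only [List.foldl_cons, pvRmF_eq_erase]
    exact ih _

-- guarded collect-fold = append of the collected values
theorem pvFoldCollect {α : Type} (P : α → Prop) [DecidablePred P] (h : α → Int) :
    ∀ (l : List α) (acc : List Int),
      l.foldl (fun a x => if P x then a ++ [h x] else a) acc =
      acc ++ (l.filter (fun x => decide (P x))).map h := by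
  intro l
  induction l with
  | nil => intro acc; simp
  | cons x xs ih =>
    intro acc
    by_cases hx : P x
    · simp [hx, ih]
    · simp [hx, ih]

-- a componentwise fold splits into three folds
theorem pvFoldProd3 {α A B C : Type} (fa : A → α → A) (fb : B → α → B) (fc : C → α → C) :
    ∀ (l : List α) (a : A) (b : B) (c : C),
      l.foldl (fun st p => (fa st.1 p, fb st.2.1 p, fc st.2.2 p)) (a, b, c) =
      (l.foldl fa a, l.foldl fb b, l.foldl fc c) := by
  intro l
  induction l with
  | nil => intro a b c; rfl
  | cons x xs ih => intro a b c; simp only [List.foldl_cons]; exact ih _ _ _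

-- a fold over enumerate that ignores the index is a fold over the list
theorem pvEnumFoldSnd {α β : Type} (g : β → α → β) :
    ∀ (xs : List α) (s : Int) (a : β),
      (PySem.List.enumerate xs s).foldl (fun acc p => g acc p.2) a = xs.foldl g a := by
  intro xs
  induction xs with
  | nil => intro s a; rfl
  | cons x xs ih =>
    intro s a
    rw [PySem.List.enumerate_cons]
    simp only [List.foldl_cons]
    exact ih _ _

-- removing each <k element of xs from xs keeps exactly the ≥k elements
theorem pvScanP_filter (k : Int) : ∀ xs : List Int,
    pvScanP (xs.filter (fun o => decide (o < k))) xs = xs.filter (fun o => decide (k ≤ o)) := by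
  intro xs
  induction xs with
  | nil => rfl
  | cons r rs ih =>
    by_cases hr : r < k
    · have h1 : (r :: rs).filter (fun o => decide (o < k)) =
          r :: rs.filter (fun o => decide (o < k)) := by simp [hr]
      have h2 : (r :: rs).filter (fun o => decide (k ≤ o)) =
          rs.filter (fun o => decide (k ≤ o)) := by simp [not_le.mpr hr]
      rw [h1, h2, pvScanP_cons, List.erase_cons_head, ih]
    · have h1 : (r :: rs).filter (fun o => decide (o < k)) =
          rs.filter (fun o => decide (o < k)) := by simp [hr]
      have h2 : (r :: rs).filter (fun o => decide (k ≤ o)) =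
          r :: rs.filter (fun o => decide (k ≤ o)) := by simp [not_lt.mp hr]
      have hnm : r ∉ rs.filter (fun o => decide (o < k)) := by
        intro hc
        exact hr (by simpa using (List.mem_filter.mp hc).2)
      rw [h1, h2]
      simp [pvScanP, hnm, ih]

-- the counter-driven pass over rows computes pvScanP of the counted multiset
theorem pvDictScan : ∀ (rows : List Int) (d : PySem.Dict Int Int) (vs acc : List Int),
    (∀ x : Int, d.getD x 0 = (vs.count x : Int)) →
    (rows.foldl pvRowStep (acc, d)).1 = acc ++ pvScanP vs rows := by
  intro rows
  induction rows with
  | nil => intro d vs acc _; simp [pvScanP]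
  | cons r rs ih =>
    intro d vs acc hinv
    have hc := hinv r
    by_cases hpos : (0 : Int) < d.getD r 0
    · have hmem : r ∈ vs := by
        have h0 : (0 : Int) < (vs.count r : Int) := by rw [← hc]; exact hpos
        exact List.count_pos_iff.mp (by exact_mod_cast h0)
      have hstep : pvRowStep (acc, d) r = (acc, d.insert r (d.getD r 0 - 1)) := by
        simp [pvRowStep, hpos]
      have hinv' : ∀ x : Int, (d.insert r (d.getD r 0 - 1)).getD x 0 = ((vs.erase r).count x : Int) := by
        intro x
        by_cases hx : x = r
        · subst hx
          have hge : 1 ≤ vs.count x := List.count_pos_iff.mpr hmem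
          rw [PySem.Dict.getD_insert_self, List.count_erase_self, hc]
          omega
        · rw [PySem.Dict.getD_insert, if_neg hx, hinv x, List.count_erase_of_ne hx]
      simp only [List.foldl_cons, hstep]
      rw [ih _ _ acc hinv']
      have : pvScanP vs (r :: rs) = pvScanP (vs.erase r) rs := by simp [pvScanP, hmem]
      rw [this]
    · have hnm : r ∉ vs := by
        intro hmem
        have := List.count_pos_iff.mpr hmem
        omega
      have hstep : pvRowStep (acc, d) r = (acc ++ [r], d) := by
        simp [pvRowStep, hpos]
      simp only [List.foldl_cons, hstep]
      rw [ih _ _ _ hinv]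
      have : pvScanP vs (r :: rs) = r :: pvScanP vs rs := by simp [pvScanP, hnm]
      rw [this]
      simp

-- under Pre_, A's loop body equals the clean componentwise step
theorem pvStepA_clean (k : Int) (occ rows : List Int)
    (hpre : Pre_find_not_secure_rows k occ rows) :
    ∀ (st : List Int × List Int × List Int) (p : Int × Int), p ∈ PySem.List.enumerate occ →
      pvStepA k rows st p =
        (pvBadStep k rows st.1 p,
         (if p.2 < k then pvRmF st.2.1 p.2 else st.2.1),
         (if p.2 < k then pvRmF st.2.2 ((PySem.List.pyGet? rows p.1).getD 0) else st.2.2)) := by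
  intro st p hp
  by_cases hk : p.2 < k
  · have hlt := hpre p hp hk
    obtain ⟨j, hj, hpe⟩ := (PySem.List.mem_enumerate_iff _ _ _).mp hp
    have hp1 : p.1 = (j : Int) := by rw [hpe]; simp
    have hjr : j < rows.length := by
      have := hlt
      rw [hp1] at this
      exact_mod_cast this
    have hget : PySem.List.pyGet? rows p.1 = some rows[j] := by
      rw [hp1, PySem.List.pyGet?_natCast]
      exact List.getElem?_eq_getElem hjr
    simp [pvStepA, pvBadStep, pvRmF, hk, hget]
  · simp [pvStepA, pvBadStep, hk]

-- ===== VERDICT (by name: the statement is the Claim_ definition above) =====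
theorem find_not_secure_rows_spec : Claim_equal_find_not_secure_rows := by
  intro k occ rows _ hpre
  unfold Spec_find_not_secure_rows
  have hcong : (PySem.List.enumerate occ).foldl (pvStepA k rows) ([], occ, rows) =
      (PySem.List.enumerate occ).foldl (fun st (p : Int × Int) =>
        ((fun a (p : Int × Int) => pvBadStep k rows a p) st.1 p,
         (fun oc (p : Int × Int) => if p.2 < k then pvRmF oc p.2 else oc) st.2.1 p,
         (fun rw' (p : Int × Int) => if p.2 < k then
            pvRmF rw' ((PySem.List.pyGet? rows p.1).getD 0) else rw') st.2.2 p))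
        ([], occ, rows) :=
    PySem.List.foldl_congr_mem _ _ _ _ (fun st p hp => pvStepA_clean k occ rows hpre st p hp)
  have h1 : find_not_secure_rows k occ rows =
      ((PySem.List.enumerate occ).foldl (fun a (p : Int × Int) => pvBadStep k rows a p) [],
       (PySem.List.enumerate occ).foldl
         (fun oc (p : Int × Int) => if p.2 < k then pvRmF oc p.2 else oc) occ,
       (PySem.List.enumerate occ).foldl
         (fun rw' (p : Int × Int) => if p.2 < k then
            pvRmF rw' ((PySem.List.pyGet? rows p.1).getD 0) else rw') rows) :=
    hcong.trans (pvFoldProd3 (fun a (p : Int × Int) => pvBadStep k rows a p)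
      (fun oc (p : Int × Int) => if p.2 < k then pvRmF oc p.2 else oc)
      (fun rw' (p : Int × Int) => if p.2 < k then
         pvRmF rw' ((PySem.List.pyGet? rows p.1).getD 0) else rw')
      (PySem.List.enumerate occ) [] occ rows)
  rw [h1]
  refine Prod.ext ?_ (Prod.ext ?_ ?_)
  · -- not_secure_rows component: both are the same collecting fold
    rfl
  · -- occurrences component
    show (PySem.List.enumerate occ).foldl
        (fun oc (p : Int × Int) => if p.2 < k then pvRmF oc p.2 else oc) occ =
      occ.filter (fun o => decide (k ≤ o))
    have e2 : (PySem.List.enumerate occ).foldl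
        (fun oc (p : Int × Int) =>
          (fun oc (o : Int) => if o < k then pvRmF oc o else oc) oc p.2) occ =
        occ.foldl (fun oc (o : Int) => if o < k then pvRmF oc o else oc) occ :=
      pvEnumFoldSnd (fun oc (o : Int) => if o < k then pvRmF oc o else oc) occ 0 occ
    refine e2.trans ?_
    refine (pvFoldGuardRemove (fun o : Int => o < k) id occ occ).trans ?_
    rw [List.map_id, pvFoldRmF_eq_foldErase, pvFoldErase_eq_scanP, pvScanP_filter]
  · -- rows component
    show (PySem.List.enumerate occ).foldl
        (fun rw' (p : Int × Int) => if p.2 < k then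
           pvRmF rw' ((PySem.List.pyGet? rows p.1).getD 0) else rw') rows =
      (rows.foldl pvRowStep
        ([], ((PySem.List.enumerate occ).foldl (pvBadStep k rows) []).foldl pvCntStep
              PySem.Dict.empty)).1
    have hbad : (PySem.List.enumerate occ).foldl (pvBadStep k rows) [] =
        ((PySem.List.enumerate occ).filter (fun p => decide (p.2 < k))).map
          (fun p => (PySem.List.pyGet? rows p.1).getD 0) := by
      simpa using pvFoldCollect (fun p : Int × Int => p.2 < k)
        (fun p => (PySem.List.pyGet? rows p.1).getD 0) (PySem.List.enumerate occ) []
    have hinv : ∀ x : Int,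
        (((PySem.List.enumerate occ).foldl (pvBadStep k rows) []).foldl pvCntStep
            PySem.Dict.empty).getD x 0 =
        ((((PySem.List.enumerate occ).foldl (pvBadStep k rows) []).count x : Int)) := by
      intro x
      have hctr : ((PySem.List.enumerate occ).foldl (pvBadStep k rows) []).foldl pvCntStep
          PySem.Dict.empty =
          PySem.Dict.counter ((PySem.List.enumerate occ).foldl (pvBadStep k rows) []) := rfl
      rw [hctr, PySem.Dict.getD_counter]
    refine (pvFoldGuardRemove (fun p : Int × Int => p.2 < k)
        (fun p => (PySem.List.pyGet? rows p.1).getD 0) (PySem.List.enumerate occ) rows).trans ?_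
    rw [pvFoldRmF_eq_foldErase, pvFoldErase_eq_scanP, ← hbad]
    rw [pvDictScan rows _ _ [] hinv]
    simp
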